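-- pv_equiv track=rewrite | github.com/krzysztof-turowski/programming-contests | google-code-jam/2020-round-1b/expogo.py | solve
-- ===== SOURCE A (Python) =====
-- def check(X, Y, out):
--     x, y = 0, 0
--     for i, c in enumerate(out):
--         if c == 'N':
--             y += 2 ** i
--         elif c == 'S':
--             y -= 2 ** i
--         elif c == 'E':
--             x += 2 ** i
--         elif c == 'W':
--             x -= 2 ** i
--     assert X == x
--     assert Y == y
--
-- def solve(X, Y):
--     def half(x):
--         return x // 2 if x > 0 else (x + (-x % 2)) // 2
--     def reverse(c):
--         M = {'S': 'N', 'N': 'S', 'W': 'E', 'E': 'W'}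
--         return M[c]
--     out, X_out, Y_out = '', X, Y
--     while X_out != 0 or Y_out != 0:
--         if (X_out + Y_out) % 2 == 0:
--             return 'IMPOSSIBLE'
--         if X_out % 2 != 0:
--             out += 'E' if X_out > 0 else 'W'
--         else:
--             out += 'N' if Y_out > 0 else 'S'
--         X_out, Y_out = half(X_out), half(Y_out)
--         if (X_out != 0 or Y_out != 0) and (X_out + Y_out) % 2 == 0:
--             if out[-1] in ['E', 'W']:
--                 X_out = X_out + 1 if out[-1] == 'E' else X_out - 1
--             else:
--                 Y_out = Y_out + 1 if out[-1] == 'N' else Y_out - 1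
--             out = out[:-1] + reverse(out[-1])
--     check(X, Y, out)
--     return out
-- ===== SOURCE B (Python) =====
-- def solve(X, Y):
--     x, y = X, Y
--     res = []
--     while x != 0 or y != 0:
--         if x % 2 == y % 2:
--             return 'IMPOSSIBLE'
--         if x % 2 != 0:
--             e, w, yh = (x - 1) // 2, (x + 1) // 2, y // 2
--             if e == 0 and yh == 0:
--                 res.append('E'); x, y = 0, 0
--             elif w == 0 and yh == 0:
--                 res.append('W'); x, y = 0, 0
--             elif e % 2 != yh % 2:
--                 res.append('E'); x, y = e, yh
--             else:
--                 res.append('W'); x, y = w, yh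
--         else:
--             n, s, xh = (y - 1) // 2, (y + 1) // 2, x // 2
--             if n == 0 and xh == 0:
--                 res.append('N'); x, y = 0, 0
--             elif s == 0 and xh == 0:
--                 res.append('S'); x, y = 0, 0
--             elif n % 2 != xh % 2:
--                 res.append('N'); x, y = xh, n
--             else:
--                 res.append('S'); x, y = xh, s
--     return ''.join(res)
-- ===== Notes on version B (the rewrite author's own statement) =====
-- stated objective: simpler
-- what changed: Replaces A's halve-then-backtrack loop (greedy by sign, then undoing the last move by string surgery when the next state's parity goes wrong) with a forward greedy that picks E/W (or N/S) by a parity lookahead on the two candidate residual states, so no move is ever revised; chars are collected in a list and joined once.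
import Mathlib
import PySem

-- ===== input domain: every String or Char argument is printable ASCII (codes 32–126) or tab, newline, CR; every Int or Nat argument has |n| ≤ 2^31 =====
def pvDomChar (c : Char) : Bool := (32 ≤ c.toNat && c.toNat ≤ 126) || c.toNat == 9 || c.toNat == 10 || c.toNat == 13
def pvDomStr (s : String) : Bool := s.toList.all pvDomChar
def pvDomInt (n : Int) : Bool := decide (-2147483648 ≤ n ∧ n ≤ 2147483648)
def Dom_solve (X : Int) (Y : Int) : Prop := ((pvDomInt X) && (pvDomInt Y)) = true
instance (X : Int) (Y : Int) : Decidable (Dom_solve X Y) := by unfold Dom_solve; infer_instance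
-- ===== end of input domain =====

-- B replaces A's halve-then-backtrack loop (string surgery on the last move) by a forward
-- greedy with a parity lookahead and no backtracking; objective: simpler.

-- ===== PORT A =====
-- half(x) = x // 2 if x > 0 else (x + (-x % 2)) // 2
def pyHalf (x : Int) : Int :=
  if x > 0 then PySem.Int.floordiv x 2
  else PySem.Int.floordiv (x + PySem.Int.mod (-x) 2) 2

-- reverse(c): dict lookup {'S':'N','N':'S','W':'E','E':'W'}[c]; A only calls it with one of
-- these four keys, so the chained ifs are exact (final branch = key 'E').
def pyReverse (c : Char) : Char :=
  if c = 'S' then 'N' else if c = 'N' then 'S' else if c = 'W' then 'E' else 'W'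

-- A's while-loop; `out` is the string being built, kept as List Char (String.ofList at the end).
-- `fuel` is only a termination guard: on Dom the loop runs at most ~64 iterations, far below 200,
-- so the fuel-0 branch is never reached there.
def solveLoopA (fuel : Nat) (x y : Int) (out : List Char) : String :=
  match fuel with
  | 0 => String.ofList out
  | fuel + 1 =>
    if x ≠ 0 ∨ y ≠ 0 then
      if PySem.Int.mod (x + y) 2 = 0 then "IMPOSSIBLE"
      else
        -- out += c ; c is out[-1] below since out1 = out ++ [c]
        let c := if PySem.Int.mod x 2 ≠ 0 then (if x > 0 then 'E' else 'W')
                 else (if y > 0 then 'N' else 'S')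
        let out1 := out ++ [c]
        let x1 := pyHalf x
        let y1 := pyHalf y
        if (x1 ≠ 0 ∨ y1 ≠ 0) ∧ PySem.Int.mod (x1 + y1) 2 = 0 then
          if c = 'E' ∨ c = 'W' then
            solveLoopA fuel (if c = 'E' then x1 + 1 else x1 - 1) y1
              (out1.dropLast ++ [pyReverse c])
          else
            solveLoopA fuel x1 (if c = 'N' then y1 + 1 else y1 - 1)
              (out1.dropLast ++ [pyReverse c])
        else
          solveLoopA fuel x1 y1 out1
    else String.ofList out

-- check(X, Y, out)'s asserts only re-verify that out encodes (X, Y); they never fail on any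
-- input (Python raises nothing there), so the call is omitted in the port.
def solve (X : Int) (Y : Int) : String := solveLoopA 200 X Y []

-- ===== PORT B =====
-- B's while-loop: forward greedy, no backtracking; `res` is the list of chars, joined at the end.
-- Same fuel guard as above, never reached on Dom.
def solveLoopB (fuel : Nat) (x y : Int) (res : List Char) : String :=
  match fuel with
  | 0 => String.ofList res
  | fuel + 1 =>
    if x ≠ 0 ∨ y ≠ 0 then
      if PySem.Int.mod x 2 = PySem.Int.mod y 2 then "IMPOSSIBLE"
      else if PySem.Int.mod x 2 ≠ 0 then
        let e := PySem.Int.floordiv (x - 1) 2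
        let w := PySem.Int.floordiv (x + 1) 2
        let yh := PySem.Int.floordiv y 2
        if e = 0 ∧ yh = 0 then solveLoopB fuel 0 0 (res ++ ['E'])
        else if w = 0 ∧ yh = 0 then solveLoopB fuel 0 0 (res ++ ['W'])
        else if PySem.Int.mod e 2 ≠ PySem.Int.mod yh 2 then solveLoopB fuel e yh (res ++ ['E'])
        else solveLoopB fuel w yh (res ++ ['W'])
      else
        let n := PySem.Int.floordiv (y - 1) 2
        let s := PySem.Int.floordiv (y + 1) 2
        let xh := PySem.Int.floordiv x 2
        if n = 0 ∧ xh = 0 then solveLoopB fuel 0 0 (res ++ ['N'])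
        else if s = 0 ∧ xh = 0 then solveLoopB fuel 0 0 (res ++ ['S'])
        else if PySem.Int.mod n 2 ≠ PySem.Int.mod xh 2 then solveLoopB fuel xh n (res ++ ['N'])
        else solveLoopB fuel xh s (res ++ ['S'])
    else String.ofList res

def solve_alt (X : Int) (Y : Int) : String := solveLoopB 200 X Y []

-- ===== PRECONDITION & SPEC =====
def Spec_solve (X : Int) (Y : Int) (out : String) : Prop := out = solve_alt X Y
instance (X : Int) (Y : Int) (out : String) : Decidable (Spec_solve X Y out) := by unfold Spec_solve; infer_instance

-- ===== CLAIM (what is proved, stated in full; the proofs are below) =====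
def Claim_equal_solve : Prop := ∀ (X : Int) (Y : Int), Dom_solve X Y → Spec_solve X Y (solve X Y)

-- ===== LEMMAS AND PROOFS =====

theorem fd2 (a : Int) : PySem.Int.floordiv a 2 = a / 2 :=
  PySem.Int.floordiv_eq_ediv_of_pos (by norm_num)

theorem md2 (a : Int) : PySem.Int.mod a 2 = a % 2 :=
  PySem.Int.mod_eq_emod_of_pos (by norm_num)


theorem half_even (y : Int) (h : y % 2 = 0) : pyHalf y = y / 2 := by
  unfold pyHalf
  simp only [fd2, md2]
  split_ifs <;> omega

theorem half_odd_pos (x : Int) (h1 : x % 2 = 1) (h2 : x > 0) : pyHalf x = (x - 1) / 2 := by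
  unfold pyHalf
  rw [if_pos h2, fd2]
  omega

theorem half_odd_neg (x : Int) (h1 : x % 2 = 1) (h2 : ¬ x > 0) : pyHalf x = (x + 1) / 2 := by
  unfold pyHalf
  rw [if_neg h2, fd2, md2]
  omega

theorem revE : pyReverse 'E' = 'W' := by decide
theorem revW : pyReverse 'W' = 'E' := by decide
theorem revN : pyReverse 'N' = 'S' := by decide
theorem revS : pyReverse 'S' = 'N' := by decide

theorem loop_eq (fuel : Nat) : ∀ (x y : Int) (l : List Char),
    solveLoopA fuel x y l = solveLoopB fuel x y l := by
  induction fuel with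
  | zero => intro x y l; rfl
  | succ n ih =>
    intro x y l
    by_cases hz : x ≠ 0 ∨ y ≠ 0
    · by_cases hp : (x + y) % 2 = 0
      · have hp2 : x % 2 = y % 2 := by omega
        simp only [solveLoopA, solveLoopB, md2, if_pos hz, if_pos hp, if_pos hp2]
      · have hp2 : ¬ x % 2 = y % 2 := by omega
        by_cases hodd : x % 2 ≠ 0
        · have hx1 : x % 2 = 1 := by omega
          have hy0 : y % 2 = 0 := by omega
          by_cases hpos : x > 0
          · simp only [solveLoopA, solveLoopB, fd2, md2, if_pos hz, if_neg hp, if_neg hp2,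
              if_pos hodd, if_pos hpos, half_odd_pos x hx1 hpos, half_even y hy0,
              List.dropLast_concat, revE]
            norm_num
            all_goals split_ifs <;> first | rfl | omega | (rw [ih]; (try (congr <;> first | rfl | omega)))
          · simp only [solveLoopA, solveLoopB, fd2, md2, if_pos hz, if_neg hp, if_neg hp2,
              if_pos hodd, if_neg hpos, half_odd_neg x hx1 hpos, half_even y hy0,
              List.dropLast_concat, revW,
              show ¬ ('W':Char) = 'E' from by decide]
            norm_num
            all_goals split_ifs <;> first | rfl | omega | (rw [ih]; (try (congr <;> first | rfl | omega)))
        · have hy1 : y % 2 = 1 := by omega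
          have hx0 : x % 2 = 0 := by omega
          by_cases hpos : y > 0
          · simp only [solveLoopA, solveLoopB, fd2, md2, if_pos hz, if_neg hp, if_neg hp2,
              if_neg hodd, if_pos hpos, half_odd_pos y hy1 hpos, half_even x hx0,
              List.dropLast_concat, revN,
              show ¬ (('N':Char) = 'E' ∨ ('N':Char) = 'W') from by decide]
            norm_num
            all_goals split_ifs <;> first | rfl | omega | (rw [ih]; (try (congr <;> first | rfl | omega)))
          · simp only [solveLoopA, solveLoopB, fd2, md2, if_pos hz, if_neg hp, if_neg hp2,
              if_neg hodd, if_neg hpos, half_odd_neg y hy1 hpos, half_even x hx0,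
              List.dropLast_concat, revS,
              show ¬ (('S':Char) = 'E' ∨ ('S':Char) = 'W') from by decide,
              show ¬ ('S':Char) = 'N' from by decide]
            norm_num
            all_goals split_ifs <;> first | rfl | omega | (rw [ih]; (try (congr <;> first | rfl | omega)))
    · simp only [solveLoopA, solveLoopB, if_neg hz]

-- ===== VERDICT (by name: the statement is the Claim_ definition above) =====
theorem solve_spec : Claim_equal_solve := by
  intro X Y _
  show solve X Y = solve_alt X Y
  exact loop_eq 200 X Y []
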